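-- pv_equiv track=rewrite | github.com/treecubed/AdventOfCode | 2021/Day 12/Day12.py | get_sub_paths
-- ===== SOURCE A (Python) =====
-- def can_revisit(path):
-- 	for cave in set(path):
-- 		match cave:
-- 			case 'start', 'end':
-- 				continue
-- 			case _ if cave.islower():
-- 				if path.count(cave) > 1:
-- 					return False
-- 	return True
--
-- def cave_valid(path, cave, part_2):
-- 	if part_2:
-- 		if can_revisit(path):
-- 			if cave != 'start' and cave != 'end':
-- 				return True
-- 	return cave.lower() not in path
--
-- def get_sub_paths(links, path, part_2):
-- 	sub_paths = []
-- 	if not path: return []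
-- 	for link in links:
-- 		for i in range(2):
-- 			if link[i] == path[-1]:
-- 				if cave_valid(path, link[i-1], part_2):
-- 					lst = path.copy()
-- 					lst.append(link[i-1])
-- 					sub_paths.append(lst)
-- 	return sub_paths
-- ===== SOURCE B (Python) =====
-- def can_revisit(path):
-- 	for cave in set(path):
-- 		match cave:
-- 			case 'start', 'end':
-- 				continue
-- 			case _ if cave.islower():
-- 				if path.count(cave) > 1:
-- 					return False
-- 	return True
--
-- def cave_valid(path, cave, part_2):
-- 	if part_2:
-- 		if can_revisit(path):
-- 			if cave != 'start' and cave != 'end':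
-- 				return True
-- 	return cave.lower() not in path
--
-- def get_sub_paths(links, path, part_2):
-- 	if not path:
-- 		return []
-- 	graph = {}
-- 	for link in links:
-- 		for i in range(2):
-- 			graph.setdefault(link[i], []).append(link[i - 1])
-- 	sub_paths = []
-- 	for nxt in graph.get(path[-1], []):
-- 		if cave_valid(path, nxt, part_2):
-- 			lst = path.copy()
-- 			lst.append(nxt)
-- 			sub_paths.append(lst)
-- 	return sub_paths
-- ===== Notes on version B (the rewrite author's own statement) =====
-- stated objective: idiomatic
-- what changed: B builds an adjacency dict from the links once (preserving A's link[i]/link[i-1] pairing and order) and then iterates only the neighbour list of path[-1], instead of A's rescanning every link and testing both endpoints per call.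
import Mathlib
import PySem

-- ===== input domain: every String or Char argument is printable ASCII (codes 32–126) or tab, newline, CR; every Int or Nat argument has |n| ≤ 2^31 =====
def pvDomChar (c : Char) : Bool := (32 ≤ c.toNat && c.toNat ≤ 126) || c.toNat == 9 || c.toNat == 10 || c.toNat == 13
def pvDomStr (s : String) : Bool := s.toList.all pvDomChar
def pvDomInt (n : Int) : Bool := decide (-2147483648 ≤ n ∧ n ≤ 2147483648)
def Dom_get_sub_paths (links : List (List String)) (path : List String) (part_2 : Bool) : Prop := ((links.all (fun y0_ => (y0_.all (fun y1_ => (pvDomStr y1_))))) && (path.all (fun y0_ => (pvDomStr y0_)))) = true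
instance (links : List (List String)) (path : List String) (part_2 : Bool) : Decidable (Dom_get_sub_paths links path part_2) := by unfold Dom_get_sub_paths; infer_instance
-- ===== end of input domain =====

-- B replaces A's per-call scan of all links (matching either endpoint) by an adjacency
-- dict built once and a single neighbour-list lookup at path[-1] (objective: idiomatic).
-- The helpers can_revisit / cave_valid are byte-identical in both Pythons and shared here.

-- ===== PORT A =====
-- hand port of Python str.islower() (exact on the ASCII domain: at least one cased
-- character and no uppercase character)
def pvIslower (s : String) : Bool :=
  s.toList.any PySem.Chars.islower && s.toList.all (fun c => !PySem.Chars.isupper c)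

-- the 'for cave in set(path)' loop of can_revisit; the match's tuple pattern
-- `case 'start','end'` never matches a string, so every cave falls to the islower guard.
-- (Result is order-independent, so iterating Set.ofList's order is exact.)
def can_revisit_loop (path : List String) : List String → Bool
  | [] => true
  | cave :: rest =>
    if pvIslower cave then
      if PySem.List.count path cave > 1 then false else can_revisit_loop path rest
    else can_revisit_loop path rest

def can_revisit (path : List String) : Bool :=
  can_revisit_loop path (PySem.Set.ofList path)

def cave_valid (path : List String) (cave : String) (part_2 : Bool) : Bool :=
  if part_2 && can_revisit path && cave != "start" && cave != "end" then true
  else !(path.contains (PySem.Str.lower cave))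

-- body of A's `for i in range(2)` unrolled: i = 0 (link[0], link[-1]) then i = 1 (link[1], link[0])
def gsp_step (path : List String) (last : String) (part_2 : Bool)
    (acc : List (List String)) (link : List String) : List (List String) :=
  let acc :=
    if ((PySem.List.pyGet? link 0).getD "" == last) then
      (if cave_valid path ((PySem.List.pyGet? link (-1)).getD "") part_2 then
        acc ++ [path ++ [(PySem.List.pyGet? link (-1)).getD ""]] else acc)
    else acc
  if ((PySem.List.pyGet? link 1).getD "" == last) then
    (if cave_valid path ((PySem.List.pyGet? link 0).getD "") part_2 then
      acc ++ [path ++ [(PySem.List.pyGet? link 0).getD ""]] else acc)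
  else acc

def get_sub_paths (links : List (List String)) (path : List String) (part_2 : Bool) : List (List String) :=
  match path.getLast? with
  | none => []
  | some last => links.foldl (gsp_step path last part_2) []

-- ===== PORT B =====
-- graph.setdefault(link[i], []).append(link[i-1]) = Dict.modify (append-or-create)
def pvAddLink (g : PySem.Dict String (List String)) (link : List String) :
    PySem.Dict String (List String) :=
  let g := g.modify ((PySem.List.pyGet? link 0).getD "") [] (· ++ [(PySem.List.pyGet? link (-1)).getD ""])
  g.modify ((PySem.List.pyGet? link 1).getD "") [] (· ++ [(PySem.List.pyGet? link 0).getD ""])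

def get_sub_paths_alt (links : List (List String)) (path : List String) (part_2 : Bool) : List (List String) :=
  match path.getLast? with
  | none => []
  | some last =>
    let graph := links.foldl pvAddLink PySem.Dict.empty
    (graph.getD last []).foldl
      (fun acc nxt => if cave_valid path nxt part_2 then acc ++ [path ++ [nxt]] else acc) []

-- ===== PRECONDITION & SPEC =====
-- Pre_ excludes only inputs where Python A raises IndexError: a nonempty path with some
-- link shorter than 2 entries (B raises there too).
def Pre_get_sub_paths (links : List (List String)) (path : List String) (part_2 : Bool) : Prop :=
  path = [] ∨ ∀ link ∈ links, 2 ≤ link.length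
instance (links : List (List String)) (path : List String) (part_2 : Bool) : Decidable (Pre_get_sub_paths links path part_2) := by unfold Pre_get_sub_paths; infer_instance

def pvWitness_get_sub_paths : List (List String) × List String × Bool :=
  ([["start", "a"], ["a", "end"]], ["start"], false)

def Spec_get_sub_paths (links : List (List String)) (path : List String) (part_2 : Bool) (out : List (List String)) : Prop := out = get_sub_paths_alt links path part_2
instance (links : List (List String)) (path : List String) (part_2 : Bool) (out : List (List String)) : Decidable (Spec_get_sub_paths links path part_2 out) := by unfold Spec_get_sub_paths; infer_instance

-- ===== CLAIM (what is proved, stated in full; the proofs are below) =====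
def Claim_equal_get_sub_paths : Prop := ∀ (links : List (List String)) (path : List String) (part_2 : Bool), Dom_get_sub_paths links path part_2 → Pre_get_sub_paths links path part_2 → Spec_get_sub_paths links path part_2 (get_sub_paths links path part_2)

-- ===== LEMMAS AND PROOFS =====

-- the (endpoint, neighbour) pairs one link contributes, in A's and B's shared order
def pvPairs (link : List String) : List (String × String) :=
  [(((PySem.List.pyGet? link 0).getD ""), ((PySem.List.pyGet? link (-1)).getD "")),
   (((PySem.List.pyGet? link 1).getD ""), ((PySem.List.pyGet? link 0).getD ""))]

def pvG (path : List String) (part_2 : Bool) (acc : List (List String)) (nxt : String) : List (List String) :=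
  if cave_valid path nxt part_2 then acc ++ [path ++ [nxt]] else acc

lemma gsp_step_eq (path : List String) (last : String) (part_2 : Bool)
    (acc : List (List String)) (link : List String) :
    gsp_step path last part_2 acc link =
      (((pvPairs link).filter (fun p => p.1 == last)).map (·.2)).foldl (pvG path part_2) acc := by
  by_cases h0 : ((PySem.List.pyGet? link 0).getD "" == last) = true <;>
    by_cases h1 : ((PySem.List.pyGet? link 1).getD "" == last) = true <;>
      simp [gsp_step, pvPairs, h0, h1, List.filter, pvG, List.foldl]

lemma foldl_gsp_eq (path : List String) (last : String) (part_2 : Bool)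
    (links : List (List String)) (acc : List (List String)) :
    links.foldl (gsp_step path last part_2) acc =
      (((links.flatMap pvPairs).filter (fun p => p.1 == last)).map (·.2)).foldl (pvG path part_2) acc := by
  induction links generalizing acc with
  | nil => simp
  | cons link rest ih =>
    simp only [List.foldl_cons, List.flatMap_cons, List.filter_append, List.map_append,
      List.foldl_append, ih, gsp_step_eq]

lemma foldl_addLink_eq (links : List (List String)) (d : PySem.Dict String (List String)) :
    links.foldl pvAddLink d =
      (links.flatMap pvPairs).foldl (fun d p => d.modify p.1 [] (· ++ [p.2])) d := by
  induction links generalizing d with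
  | nil => rfl
  | cons link rest ih =>
    simp only [List.foldl_cons, List.flatMap_cons, List.foldl_append, ih]
    rfl

lemma graph_getD_eq (links : List (List String)) (last : String) :
    (links.foldl pvAddLink PySem.Dict.empty).getD last [] =
      (((links.flatMap pvPairs).filter (fun p => p.1 == last)).map (·.2)) := by
  rw [foldl_addLink_eq]
  rw [PySem.Dict.getD_foldl_modify_append]
  simp [PySem.Dict.empty, PySem.Dict.getD, PySem.Dict.get?]

-- ===== VERDICT (by name: the statement is the Claim_ definition above) =====
theorem get_sub_paths_spec : Claim_equal_get_sub_paths := by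
  intro links path part_2 _ _
  unfold Spec_get_sub_paths get_sub_paths get_sub_paths_alt
  cases h : path.getLast? with
  | none => rfl
  | some last =>
    simp only [foldl_gsp_eq, graph_getD_eq]
    congr 1
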